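-- pv_equiv track=rewrite | github.com/peterwj/advent-of-code | day11.py | includes_run
-- ===== SOURCE A (Python) =====
-- def includes_run(password):
--     for i in range(len(password) - 2):
--         if (
--                 ord(password[i]) == ord(password[i+1]) - 1 and
--                 ord(password[i]) == ord(password[i+2]) - 2
--         ):
--             return True
--     return False
-- ===== SOURCE B (Python) =====
-- def includes_run(password):
--     # generate-and-test: try every possible ascending 3-char run as a substring
--     return any(chr(c) + chr(c + 1) + chr(c + 2) in password for c in range(32, 125))
-- ===== Notes on version B (the rewrite author's own statement) =====
-- stated objective: alternative
-- what changed: B enumerates every possible ascending 3-character run (codes 32..124 within the printable domain) and tests each candidate as a substring of the password, instead of scanning the password and comparing characters at offsets 0/1/2.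
import Mathlib
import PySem

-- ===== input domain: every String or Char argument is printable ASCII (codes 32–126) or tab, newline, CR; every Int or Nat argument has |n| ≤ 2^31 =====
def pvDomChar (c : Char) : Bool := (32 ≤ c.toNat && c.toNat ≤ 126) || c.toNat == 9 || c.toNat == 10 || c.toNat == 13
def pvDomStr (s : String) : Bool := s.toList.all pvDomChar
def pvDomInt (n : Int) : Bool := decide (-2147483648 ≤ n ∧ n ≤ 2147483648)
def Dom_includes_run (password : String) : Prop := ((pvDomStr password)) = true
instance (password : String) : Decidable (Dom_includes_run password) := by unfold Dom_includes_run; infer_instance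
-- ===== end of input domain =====

-- B replaces A's scan of the password by generate-and-test: it enumerates every possible ascending
-- 3-character run over the printable-ASCII domain and checks each as a substring (objective: alternative).

-- ===== PORT A =====
-- ord(password[i]) as an Int; indices produced by range are always in bounds
def pvOrdA (cs : List Char) (i : Int) : Int :=
  (((PySem.List.pyGet? cs i).getD ' ').toNat : Int)

def includes_run (password : String) : Bool :=
  let cs := password.toList
  (PySem.List.pyRange 0 ((cs.length : Int) - 2) 1).any (fun i =>
    (pvOrdA cs i == pvOrdA cs (i + 1) - 1) && (pvOrdA cs i == pvOrdA cs (i + 2) - 2))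

-- ===== PORT B =====
-- chr(c) + chr(c+1) + chr(c+2), as a list of characters
def pvRunCand (c : Nat) : List Char := [Char.ofNat c, Char.ofNat (c + 1), Char.ofNat (c + 2)]

-- Python's substring test 's in password' is ported as List.IsInfix on the character lists (exact)
def includes_run_alt (password : String) : Bool :=
  (PySem.List.pyRange 32 125 1).any (fun c =>
    decide (pvRunCand c.toNat <:+: password.toList))

-- ===== PRECONDITION & SPEC =====
def Spec_includes_run (password : String) (out : Bool) : Prop := out = includes_run_alt password
instance (password : String) (out : Bool) : Decidable (Spec_includes_run password out) := by unfold Spec_includes_run; infer_instance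

-- ===== CLAIM (what is proved, stated in full; the proofs are below) =====
def Claim_equal_includes_run : Prop := ∀ (password : String), Dom_includes_run password → Spec_includes_run password (includes_run password)

-- ===== LEMMAS AND PROOFS =====

-- the common index-form characterisation: three consecutive codes at position k
def pvRunAt (cs : List Char) (k : Nat) : Prop :=
  k + 2 < cs.length ∧
  (cs.getD (k + 1) ' ').toNat = (cs.getD k ' ').toNat + 1 ∧
  (cs.getD (k + 2) ' ').toNat = (cs.getD k ' ').toNat + 2

theorem pvOrdA_natCast (cs : List Char) (k : Nat) :
    pvOrdA cs (k : Int) = ((cs.getD k ' ').toNat : Int) := by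
  simp [pvOrdA, List.getD]

theorem char_eq_of_toNat_eq {a b : Char} (h : a.toNat = b.toNat) : a = b := by
  apply Char.ext
  exact UInt32.toNat_inj.mp h

theorem toNat_ofNat_small {n : Nat} (h : n < 55296) : (Char.ofNat n).toNat = n := by
  rw [Char.toNat_ofNat]
  have : n.isValidChar := Or.inl h
  simp [this]

-- A = true ↔ some position carries a run
theorem includes_run_iff (password : String) :
    includes_run password = true ↔ ∃ k, pvRunAt password.toList k := by
  unfold includes_run
  dsimp only
  set cs := password.toList with hcs
  rw [PySem.List.pyRange_one, List.any_eq_true]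
  constructor
  · rintro ⟨i, hi, hcond⟩
    rw [List.mem_map] at hi
    obtain ⟨k, hk, rfl⟩ := hi
    rw [List.mem_range] at hk
    refine ⟨k, by omega, ?_⟩
    simp only [zero_add] at hcond
    have e1 : (k : Int) + 1 = ((k + 1 : Nat) : Int) := by push_cast; ring
    have e2 : (k : Int) + 2 = ((k + 2 : Nat) : Int) := by push_cast; ring
    rw [e1, e2, pvOrdA_natCast, pvOrdA_natCast, pvOrdA_natCast] at hcond
    simp only [Bool.and_eq_true, beq_iff_eq] at hcond
    omega
  · rintro ⟨k, hk, h1, h2⟩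
    refine ⟨(k : Int), ?_, ?_⟩
    · rw [List.mem_map]
      exact ⟨k, by rw [List.mem_range]; omega, by ring⟩
    · have e1 : (k : Int) + 1 = ((k + 1 : Nat) : Int) := by push_cast; ring
      have e2 : (k : Int) + 2 = ((k + 2 : Nat) : Int) := by push_cast; ring
      rw [e1, e2, pvOrdA_natCast, pvOrdA_natCast, pvOrdA_natCast]
      simp only [Bool.and_eq_true, beq_iff_eq]
      omega

-- a three-element infix is exactly three consecutive positions
theorem triple_infix_iff (a b c : Char) (cs : List Char) :
    [a, b, c] <:+: cs ↔
    ∃ k, k + 2 < cs.length ∧ cs.getD k ' ' = a ∧ cs.getD (k + 1) ' ' = b ∧ cs.getD (k + 2) ' ' = c := by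
  constructor
  · rintro ⟨s, t, h⟩
    refine ⟨s.length, ?_, ?_, ?_, ?_⟩ <;>
    · subst h
      simp [List.getD_eq_getElem?_getD, List.length_append]
      try omega
  · rintro ⟨k, hk, ha, hb, hc⟩
    refine ⟨cs.take k, cs.drop (k + 3), ?_⟩
    have h0 : k < cs.length := by omega
    have h1 : k + 1 < cs.length := by omega
    have h2 : k + 2 < cs.length := by omega
    have ha' : cs[k] = a := by rwa [List.getD_eq_getElem?_getD, List.getElem?_eq_getElem h0] at ha
    have hb' : cs[k+1] = b := by rwa [List.getD_eq_getElem?_getD, List.getElem?_eq_getElem h1] at hb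
    have hc' : cs[k+2] = c := by rwa [List.getD_eq_getElem?_getD, List.getElem?_eq_getElem h2] at hc
    have e3 : cs.drop (k + 2) = c :: cs.drop (k + 3) := by
      rw [List.drop_eq_getElem_cons h2, hc', show k + 2 + 1 = k + 3 from by omega]
    have e2 : cs.drop (k + 1) = b :: c :: cs.drop (k + 3) := by
      rw [List.drop_eq_getElem_cons h1, hb', show k + 1 + 1 = k + 2 from by omega, e3]
    have : cs.drop k = a :: b :: c :: cs.drop (k + 3) := by
      rw [List.drop_eq_getElem_cons h0, ha', e2]
    calc cs.take k ++ [a, b, c] ++ cs.drop (k + 3)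
        = cs.take k ++ ([a, b, c] ++ cs.drop (k + 3)) := by rw [List.append_assoc]
      _ = cs.take k ++ cs.drop k := by rw [this]; rfl
      _ = cs := List.take_append_drop k cs

-- B = true ↔ some candidate run with starting code in [32, 124] is an infix
theorem includes_run_alt_iff (password : String) :
    includes_run_alt password = true ↔
    ∃ c : Nat, 32 ≤ c ∧ c ≤ 124 ∧ pvRunCand c <:+: password.toList := by
  unfold includes_run_alt
  rw [List.any_eq_true]
  constructor
  · rintro ⟨i, hi, hd⟩
    rw [PySem.List.mem_pyRange_one] at hi
    rw [decide_eq_true_iff] at hd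
    refine ⟨i.toNat, by omega, by omega, hd⟩
  · rintro ⟨c, h32, h124, hinf⟩
    refine ⟨(c : Int), ?_, ?_⟩
    · rw [PySem.List.mem_pyRange_one]; omega
    · rw [decide_eq_true_iff]
      simpa using hinf

-- on domain characters, a run's starting code lies in [32, 124]
theorem dom_run_code (password : String) (hdom : Dom_includes_run password) (k : Nat)
    (hr : pvRunAt password.toList k) :
    32 ≤ (password.toList.getD k ' ').toNat ∧ (password.toList.getD k ' ').toNat ≤ 124 := by
  obtain ⟨hk, h1, h2⟩ := hr
  unfold Dom_includes_run pvDomStr at hdom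
  rw [List.all_eq_true] at hdom
  have mem : ∀ j, j < password.toList.length → pvDomChar (password.toList.getD j ' ') = true := by
    intro j hj
    rw [List.getD_eq_getElem?_getD, List.getElem?_eq_getElem hj]
    exact hdom _ (List.getElem_mem hj)
  have d0 := mem k (by omega)
  have d1 := mem (k + 1) (by omega)
  have d2 := mem (k + 2) (by omega)
  simp only [pvDomChar, Bool.or_eq_true, Bool.and_eq_true, decide_eq_true_iff, beq_iff_eq]
    at d0 d1 d2
  omega

theorem includes_run_eq_alt (password : String) (hdom : Dom_includes_run password) :
    includes_run password = includes_run_alt password := by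
  rw [Bool.eq_iff_iff, includes_run_iff, includes_run_alt_iff]
  constructor
  · rintro ⟨k, hr⟩
    obtain ⟨h32, h124⟩ := dom_run_code password hdom k hr
    obtain ⟨hk, h1, h2⟩ := hr
    set c := (password.toList.getD k ' ').toNat with hc
    refine ⟨c, h32, h124, ?_⟩
    rw [pvRunCand, triple_infix_iff]
    refine ⟨k, hk, ?_, ?_, ?_⟩
    · rw [hc, Char.ofNat_toNat]
    · exact (char_eq_of_toNat_eq (by rw [toNat_ofNat_small (by omega)]; omega)).symm
    · exact (char_eq_of_toNat_eq (by rw [toNat_ofNat_small (by omega)]; omega)).symm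
  · rintro ⟨c, h32, h124, hinf⟩
    rw [pvRunCand, triple_infix_iff] at hinf
    obtain ⟨k, hk, ha, hb, hcc⟩ := hinf
    refine ⟨k, hk, ?_, ?_⟩
    · rw [hb, ha, toNat_ofNat_small (by omega), toNat_ofNat_small (by omega)]
    · rw [hcc, ha, toNat_ofNat_small (by omega), toNat_ofNat_small (by omega)]

-- ===== VERDICT (by name: the statement is the Claim_ definition above) =====
theorem includes_run_spec : Claim_equal_includes_run := by
  intro password hdom
  unfold Spec_includes_run
  exact includes_run_eq_alt password hdom
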